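-- pv_equiv track=rewrite | github.com/pypi-data/pypi-mirror-398 | packages/biencrypt/biencrypt-1.0.0-py3-none-any.whl/biencrypt_lib.py | adjacent_decrypt
-- ===== SOURCE A (Python) =====
-- def adjacent_decrypt(text, seed=0):
--     """
--     Decrypts text encrypted with adjacent_encrypt.
--
--     Args:
--         text (str): Encrypted text
--         seed (int): Optional seed used during encryption (default: 0)
--
--     Returns:
--         str: Decrypted text
--     """
--     if not text:
--         return ""
--
--     chars = list(text)
--
--     # Swap adjacent pairs
--     for i in range(0, len(chars) - 1, 2):
--         chars[i], chars[i + 1] = chars[i + 1], chars[i]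
--
--     try:
--         n = int(seed)
--     except Exception:
--         n = 0
--
--     length = len(chars)
--     rot = (n % length) if length > 0 else 0
--
--     # Rotate left by rot
--     if rot:
--         chars = chars[rot:] + chars[:rot]
--
--     return ''.join(chars)
-- ===== SOURCE B (Python) =====
-- def adjacent_decrypt(text, seed=0):
--     """Same result as A, but computed in one index-driven pass: for each
--     output position j, undo the left-rotation (k = (j + rot) % length) and
--     the adjacent-pair swap (partner index) directly on the original string."""
--     if not text:
--         return ""
--     try:
--         n = int(seed)
--     except Exception:
--         n = 0
--     length = len(text)
--     rot = n % length
--     out = []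
--     for j in range(length):
--         k = (j + rot) % length
--         p = k + 1 if k % 2 == 0 else k - 1
--         out.append(text[p] if p < length else text[k])
--     return ''.join(out)
-- ===== Notes on version B (the rewrite author's own statement) =====
-- stated objective: alternative
-- what changed: Replaces A's two passes (mutate a char list swapping adjacent pairs in place, then rotate by list slicing) with a single comprehension over output positions that computes, for each output index j, the source index directly: undo the rotation with k=(j+rot)%length and the pair swap by reading the partner index k+1/k-1, guarded so an odd-length last char stays unswapped exactly as in A.
import Mathlib
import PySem

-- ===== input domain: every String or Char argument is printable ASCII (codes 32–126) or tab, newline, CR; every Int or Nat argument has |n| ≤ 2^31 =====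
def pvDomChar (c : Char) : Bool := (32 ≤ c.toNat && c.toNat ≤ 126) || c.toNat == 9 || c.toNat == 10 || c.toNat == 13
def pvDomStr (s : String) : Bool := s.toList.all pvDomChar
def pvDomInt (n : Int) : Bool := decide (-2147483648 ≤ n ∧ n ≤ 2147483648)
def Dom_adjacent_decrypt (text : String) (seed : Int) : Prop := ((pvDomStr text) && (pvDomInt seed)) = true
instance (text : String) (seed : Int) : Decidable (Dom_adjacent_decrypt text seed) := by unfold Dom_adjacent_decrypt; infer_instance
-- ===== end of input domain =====

-- B changes the decomposition: one index-computed pass over the original string instead of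
-- mutating a char list (pair swaps) and then slicing for the rotation; same cost, no speed claim.

-- ===== PORT A =====
-- Python's 'chars[i], chars[i+1] = chars[i+1], chars[i]' (both indices in range in A's loop)
def swapStep (l : List Char) (i : Int) : List Char :=
  match PySem.List.pyGet? l i, PySem.List.pyGet? l (i + 1) with
  | some a, some b => PySem.List.pySetD (PySem.List.pySetD l i b) (i + 1) a
  | _, _ => l

def adjacent_decrypt (text : String) (seed : Int) : String :=
  if text.toList = [] then ""
  else
    let chars := text.toList
    let chars := (PySem.List.pyRange 0 ((chars.length : Int) - 1) 2).foldl swapStep chars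
    -- int(seed) on an int is the identity, so the try/except always binds n = seed
    let n := seed
    let length : Int := (chars.length : Int)
    let rot : Int := if length > 0 then PySem.Int.mod n length else 0
    let chars := if rot ≠ 0 then
        PySem.List.slice chars (some rot) none ++ PySem.List.slice chars none (some rot)
      else chars
    String.ofList chars

-- ===== PORT B =====
def adjacent_decrypt_alt (text : String) (seed : Int) : String :=
  if text.toList = [] then ""
  else
    let n := seed
    let cs := text.toList
    let length := cs.length
    let rot := (PySem.Int.mod n (length : Int)).toNat
    String.ofList ((List.range length).map (fun j =>
      let k := (j + rot) % length
      let p := if k % 2 = 0 then k + 1 else k - 1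
      if p < length then cs.getD p default else cs.getD k default))

-- ===== PRECONDITION & SPEC =====
def Spec_adjacent_decrypt (text : String) (seed : Int) (out : String) : Prop := out = adjacent_decrypt_alt text seed
instance (text : String) (seed : Int) (out : String) : Decidable (Spec_adjacent_decrypt text seed out) := by unfold Spec_adjacent_decrypt; infer_instance

-- ===== CLAIM (what is proved, stated in full; the proofs are below) =====
def Claim_equal_adjacent_decrypt : Prop := ∀ (text : String) (seed : Int), Dom_adjacent_decrypt text seed → Spec_adjacent_decrypt text seed (adjacent_decrypt text seed)

-- ===== LEMMAS AND PROOFS =====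

-- A's pair-swapping loop, as a structural function (proof-side characterisation).
def swapPairs : List Char → List Char
  | a :: b :: t => b :: a :: swapPairs t
  | l => l

theorem length_swapPairs : ∀ l : List Char, (swapPairs l).length = l.length
  | [] => rfl
  | [_] => rfl
  | _ :: _ :: t => by simp [swapPairs, length_swapPairs t]

theorem swapStep_zero (a b : Char) (t : List Char) :
    swapStep (a :: b :: t) 0 = b :: a :: t := by
  simp [swapStep, pysem]

theorem swapStep_shift (x y : Char) (t : List Char) (n : Nat) :
    swapStep (x :: y :: t) ((n : Int) + 2) = x :: y :: swapStep t n := by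
  have h1 : ((n : Int) + 2) = ((n + 2 : Nat) : Int) := by push_cast; ring
  have h2 : ((n : Int) + 2 + 1) = ((n + 3 : Nat) : Int) := by push_cast; ring
  have h3 : ((n : Int) + 1) = ((n + 1 : Nat) : Int) := by push_cast; ring
  have gA : PySem.List.pyGet? (x :: y :: t) ((n : Int) + 2) = t[n]? := by
    rw [h1, PySem.List.pyGet?_natCast, show n + 2 = (n + 1) + 1 from rfl,
      List.getElem?_cons_succ, List.getElem?_cons_succ]
  have gB : PySem.List.pyGet? (x :: y :: t) ((n : Int) + 2 + 1) = t[n + 1]? := by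
    rw [h2, PySem.List.pyGet?_natCast, show n + 3 = ((n + 1) + 1) + 1 from rfl,
      List.getElem?_cons_succ, List.getElem?_cons_succ]
  have gC : PySem.List.pyGet? t ((n : Nat) : Int) = t[n]? := PySem.List.pyGet?_natCast t n
  have gD : PySem.List.pyGet? t ((n : Int) + 1) = t[n + 1]? := by
    rw [h3, PySem.List.pyGet?_natCast]
  have sA : ∀ (l : List Char) (v : Char),
      PySem.List.pySetD (x :: y :: l) ((n : Int) + 2) v = x :: y :: l.set n v := by
    intro l v
    rw [h1, PySem.List.pySetD_natCast, show n + 2 = (n + 1) + 1 from rfl,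
      List.set_cons_succ, List.set_cons_succ]
  have sB : ∀ (l : List Char) (v : Char),
      PySem.List.pySetD (x :: y :: l) ((n : Int) + 2 + 1) v = x :: y :: l.set (n + 1) v := by
    intro l v
    rw [h2, PySem.List.pySetD_natCast, show n + 3 = ((n + 1) + 1) + 1 from rfl,
      List.set_cons_succ, List.set_cons_succ]
  have sC : ∀ (l : List Char) (v : Char),
      PySem.List.pySetD l ((n : Nat) : Int) v = l.set n v := by
    intro l v; rw [PySem.List.pySetD_natCast]
  have sD : ∀ (l : List Char) (v : Char),
      PySem.List.pySetD l ((n : Int) + 1) v = l.set (n + 1) v := by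
    intro l v; rw [h3, PySem.List.pySetD_natCast]
  simp only [swapStep, gA, gB, gC, gD]
  cases t[n]? <;> cases t[n + 1]? <;> simp only [sA, sB, sC, sD]

theorem swap_comm (L : List Nat) (x y : Char) (t : List Char) :
    L.foldl (fun acc (k : Nat) => swapStep acc (0 + 2 * ((k + 1 : Nat) : Int))) (x :: y :: t)
      = x :: y :: L.foldl (fun acc (k : Nat) => swapStep acc (0 + 2 * (k : Int))) t := by
  induction L generalizing t with
  | nil => rfl
  | cons k L ih =>
      simp only [List.foldl_cons]
      have h1 : (0 + 2 * ((k + 1 : Nat) : Int)) = ((2 * k : Nat) : Int) + 2 := by push_cast; ring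
      have h2 : (0 + 2 * ((k : Nat) : Int)) = ((2 * k : Nat) : Int) := by push_cast; ring
      rw [h1, h2, swapStep_shift, ih]

theorem swapA' : ∀ l : List Char,
    (List.range (l.length / 2)).foldl (fun acc (k : Nat) => swapStep acc (0 + 2 * (k : Int))) l
      = swapPairs l
  | [] => rfl
  | [_] => by simp [swapPairs]
  | a :: b :: t => by
      have hM : (a :: b :: t).length / 2 = t.length / 2 + 1 := by
        simp only [List.length_cons]; omega
      rw [hM, List.range_succ_eq_map, List.foldl_cons, List.foldl_map]
      have h0 : swapStep (a :: b :: t) (0 + 2 * ((0 : Nat) : Int)) = b :: a :: t := by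
        simpa using swapStep_zero a b t
      rw [h0]
      have hc := swap_comm (List.range (t.length / 2)) b a t
      simp only [Nat.succ_eq_add_one] at hc ⊢
      rw [hc, swapA' t]
      rfl

theorem foldA (cs : List Char) :
    (PySem.List.pyRange 0 ((cs.length : Int) - 1) 2).foldl swapStep cs = swapPairs cs := by
  rw [PySem.List.pyRange_of_pos _ _ (by norm_num), List.foldl_map]
  have hM : (if (0 : Int) < (cs.length : Int) - 1
      then (((cs.length : Int) - 1 - 0 + 2 - 1) / 2).toNat else 0) = cs.length / 2 := by
    split_ifs with h <;> omega
  rw [hM]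
  exact swapA' cs

theorem swapPairs_getD : ∀ (l : List Char) (k : Nat), k < l.length →
    (swapPairs l).getD k default
      = if k % 2 = 0 then
          (if k + 1 < l.length then l.getD (k + 1) default else l.getD k default)
        else l.getD (k - 1) default
  | [], k, hk => by simp at hk
  | [a], 0, _ => by simp [swapPairs]
  | [a], (k+1), hk => by simp at hk
  | a :: b :: t, 0, _ => by simp [swapPairs]
  | a :: b :: t, 1, _ => by simp [swapPairs]
  | a :: b :: t, (k+2), hk => by
      have hk' : k < t.length := by simp only [List.length_cons] at hk; omega
      have ih := swapPairs_getD t k hk'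
      have e0 : (swapPairs (a :: b :: t)).getD (k + 2) default = (swapPairs t).getD k default := by
        rw [show k + 2 = (k + 1) + 1 from rfl]
        simp [swapPairs]
      have e1 : (a :: b :: t).getD (k + 2 + 1) default = t.getD (k + 1) default := by
        simp
      have e2 : (a :: b :: t).getD (k + 2) default = t.getD k default := by
        rw [show k + 2 = (k + 1) + 1 from rfl]
        simp
      have e3 : k ≥ 1 → (a :: b :: t).getD (k + 2 - 1) default = t.getD (k - 1) default := by
        intro h1
        rw [show k + 2 - 1 = (k - 1 + 1) + 1 by omega]
        simp only [List.getD_cons_succ]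
      rw [e0, ih]
      have hm : (k + 2) % 2 = k % 2 := by omega
      rw [hm]
      by_cases hp : k % 2 = 0
      · rw [if_pos hp, if_pos hp]
        by_cases hq : k + 1 < t.length
        · rw [if_pos hq, if_pos (show k + 2 + 1 < (a :: b :: t).length by
            simp only [List.length_cons]; omega), e1]
        · rw [if_neg hq, if_neg (show ¬ (k + 2 + 1 < (a :: b :: t).length) by
            simp only [List.length_cons]; omega), e2]
      · rw [if_neg hp, if_neg hp, e3 (by omega)]

theorem core (cs : List Char) (hlen : 0 < cs.length) (rn : Nat) :
    (swapPairs cs).rotate rn = (List.range cs.length).map (fun j =>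
      let k := (j + rn) % cs.length
      let p := if k % 2 = 0 then k + 1 else k - 1
      if p < cs.length then cs.getD p default else cs.getD k default) := by
  apply List.ext_getElem
  · simp [length_swapPairs]
  · intro i h1 h2
    rw [List.getElem_map, List.getElem_range]
    rw [List.getElem_rotate]
    have hlsp : (swapPairs cs).length = cs.length := length_swapPairs cs
    have h' : (i + rn) % (swapPairs cs).length < (swapPairs cs).length :=
      Nat.mod_lt _ (by rw [hlsp]; exact hlen)
    rw [← List.getD_eq_getElem _ default h', hlsp]
    dsimp only
    set k := (i + rn) % cs.length with hkdef
    have hklt : k < cs.length := by rw [hkdef]; exact Nat.mod_lt _ hlen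
    rw [swapPairs_getD cs k hklt]
    by_cases hp : k % 2 = 0
    · rw [if_pos hp, if_pos hp]
    · rw [if_neg hp, if_neg hp, if_pos (by omega)]

-- ===== VERDICT (by name: the statement is the Claim_ definition above) =====
theorem adjacent_decrypt_spec : Claim_equal_adjacent_decrypt := by
  intro text seed _
  unfold Spec_adjacent_decrypt adjacent_decrypt adjacent_decrypt_alt
  by_cases h : text.toList = []
  · rw [if_pos h, if_pos h]
  · rw [if_neg h, if_neg h]
    have hlen : 0 < text.toList.length := List.length_pos_of_ne_nil h
    simp only [foldA, length_swapPairs]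
    set cs := text.toList with hcs
    set r : Int := PySem.Int.mod seed (cs.length : Int) with hr
    have hlenI : (0 : Int) < (cs.length : Int) := by exact_mod_cast hlen
    have hr0 : 0 ≤ r := PySem.Int.mod_nonneg seed hlenI
    have hrlt : r < (cs.length : Int) := PySem.Int.mod_lt seed hlenI
    rw [if_pos hlenI]
    have hrn : r = ((r.toNat : Nat) : Int) := by omega
    have hrot : (if r ≠ 0 then
        PySem.List.slice (swapPairs cs) (some r) none ++ PySem.List.slice (swapPairs cs) none (some r)
      else swapPairs cs) = (swapPairs cs).rotate r.toNat := by
      split_ifs with hz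
      · rw [PySem.List.slice_from _ hr0, PySem.List.slice_to _ hr0]
        rw [List.rotate_eq_drop_append_take (by rw [length_swapPairs]; omega)]
      · have : r.toNat = 0 := by omega
        rw [this, List.rotate_zero]
    rw [hrot, core cs hlen r.toNat]
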